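-- pv_equiv track=rewrite | github.com/aleczd/nono | script.py | acqRow
-- ===== SOURCE A (Python) =====
-- def acqRow(cmap,j):
--     curRow = []
--     for k in range(0,len(cmap)):
--         curRow.append(cmap[k][j])
--     if 1 not in curRow:
--         return [0]
--     crd = []
--     count = 0
--     track = False
--     for k in range(0,len(curRow)):
--         if track:
--             if cmap[k][j] == 1:
--                 count += 1
--             else:
--                 crd.append(count)
--                 count = 0
--                 track = False
--         else:
--             if cmap[k][j] == 1:
--                 count += 1
--                 track = True
--     if track:
--         crd.append(count)
--     return crd
-- ===== SOURCE B (Python) =====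
-- def acqRow(cmap, j):
--     col = [row[j] for row in cmap]
--     runs = [len(g) for g in "".join("1" if x == 1 else "0" for x in col).split("0") if g]
--     return runs or [0]
-- ===== Notes on version B (the rewrite author's own statement) =====
-- stated objective: simpler
-- what changed: Replaces the explicit track/count state machine (and the separate membership pre-scan) with a declarative pipeline: encode the column as a 0/1 string, split on '0', and take the lengths of the nonempty groups, with 'runs or [0]' covering the all-zero column.
import Mathlib
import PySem

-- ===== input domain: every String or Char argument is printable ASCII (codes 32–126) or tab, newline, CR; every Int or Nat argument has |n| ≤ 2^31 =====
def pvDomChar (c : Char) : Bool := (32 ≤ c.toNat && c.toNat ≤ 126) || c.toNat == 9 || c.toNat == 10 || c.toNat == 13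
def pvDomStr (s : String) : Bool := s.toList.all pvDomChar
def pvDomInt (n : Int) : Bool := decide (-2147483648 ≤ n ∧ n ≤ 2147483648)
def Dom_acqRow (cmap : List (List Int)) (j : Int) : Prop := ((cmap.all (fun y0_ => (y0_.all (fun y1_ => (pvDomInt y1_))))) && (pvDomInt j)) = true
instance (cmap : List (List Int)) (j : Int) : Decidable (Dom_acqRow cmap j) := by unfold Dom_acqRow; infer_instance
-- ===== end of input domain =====

-- B replaces A's track/count state machine and membership pre-scan with an encode/split-on-'0'/measure-groups pipeline (simpler, same cost).

-- ===== PORT A =====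
-- loop body of A's second pass: branch on track, then on cmap[k][j] == 1
def stepA (st : List Int × Int × Bool) (x : Int) : List Int × Int × Bool :=
  match st with
  | (crd, count, true) => if x = 1 then (crd, count + 1, true) else (crd ++ [count], 0, false)
  | (crd, count, false) => if x = 1 then (crd, count + 1, true) else (crd, count, false)

def acqRow (cmap : List (List Int)) (j : Int) : List Int :=
  -- curRow = [cmap[k][j] for k in range(0, len(cmap))]  (appended one by one, as in A)
  let curRow := (PySem.List.pyRange 0 (cmap.length : Int) 1).foldl
      (fun acc k => acc ++ [PySem.List.pyGetD (PySem.List.pyGetD cmap k []) j 0]) []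
  if (1 : Int) ∉ curRow then [0]
  else
    -- second loop over range(0, len(curRow)) with state (crd, count, track)
    let st := (PySem.List.pyRange 0 (curRow.length : Int) 1).foldl
      (fun (st : List Int × Int × Bool) k =>
        stepA st (PySem.List.pyGetD (PySem.List.pyGetD cmap k []) j 0)) ([], 0, false)
    if st.2.2 then st.1 ++ [st.2.1] else st.1

-- ===== PORT B =====
-- hand port of str.split("0") on the encoded column (exact: "".join(...).split("0") over '0'/'1' chars)
def pySplitZero : List Char → List (List Char)
  | [] => [[]]
  | c :: cs =>
    if c = '0' then [] :: pySplitZero cs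
    else match pySplitZero cs with
      | [] => [[c]]
      | h :: t => (c :: h) :: t

def acqRow_alt (cmap : List (List Int)) (j : Int) : List Int :=
  let col := cmap.map (fun row => PySem.List.pyGetD row j 0)
  let s := col.map (fun x => if x = 1 then '1' else '0')
  let runs := ((pySplitZero s).filter (fun g => g ≠ [])).map (fun g => ((g.length : Int)))
  if runs = [] then [0] else runs

-- ===== PRECONDITION & SPEC =====
-- Pre_ excludes exactly the inputs where Python raises IndexError: some row of cmap lacks index j.
def Pre_acqRow (cmap : List (List Int)) (j : Int) : Prop :=
  ∀ row ∈ cmap, PySem.Raise.InRange row.length j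
instance (cmap : List (List Int)) (j : Int) : Decidable (Pre_acqRow cmap j) := by unfold Pre_acqRow; infer_instance
def pvWitness_acqRow : List (List Int) × Int := ([[1, 0], [1, 1], [0, 1]], 0)

def Spec_acqRow (cmap : List (List Int)) (j : Int) (out : List Int) : Prop := out = acqRow_alt cmap j
instance (cmap : List (List Int)) (j : Int) (out : List Int) : Decidable (Spec_acqRow cmap j out) := by unfold Spec_acqRow; infer_instance

-- ===== CLAIM (what is proved, stated in full; the proofs are below) =====
def Claim_equal_acqRow : Prop := ∀ (cmap : List (List Int)) (j : Int), Dom_acqRow cmap j → Pre_acqRow cmap j → Spec_acqRow cmap j (acqRow cmap j)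

-- ===== LEMMAS AND PROOFS =====

-- reference form: run lengths of 1s, with `count` ones already pending
def runsAux (count : Int) : List Int → List Int
  | [] => if count = 0 then [] else [count]
  | x :: xs => if x = 1 then runsAux (count + 1) xs
               else if count = 0 then runsAux 0 xs else count :: runsAux 0 xs

theorem pySplitZero_ne_nil (s : List Char) : pySplitZero s ≠ [] := by
  induction s with
  | nil => simp [pySplitZero]
  | cons c cs ih =>
    simp only [pySplitZero]
    split
    · simp
    · cases h : pySplitZero cs <;> simp

theorem runsAux_eq_nil_iff (col : List Int) (count : Int) (hc : 0 ≤ count) :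
    runsAux count col = [] ↔ (count = 0 ∧ (1 : Int) ∉ col) := by
  induction col generalizing count with
  | nil => simp [runsAux]
  | cons x xs ih =>
    by_cases hx : x = 1
    · subst hx
      rw [runsAux, if_pos rfl, ih (count + 1) (by omega)]
      constructor
      · rintro ⟨h, _⟩; omega
      · rintro ⟨_, h⟩; simp at h
    · rw [runsAux, if_neg hx]
      by_cases h0 : count = 0
      · rw [if_pos h0, ih 0 le_rfl]
        simp [h0, Ne.symm hx]
      · rw [if_neg h0]
        simp [h0]

-- A's state machine, run over the column values, computes runsAux
theorem machine_eq_runsAux (col : List Int) (crd : List Int) (count : Int) (track : Bool)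
    (hinv : if track then 1 ≤ count else count = 0) :
    (let st := col.foldl stepA (crd, count, track)
     if st.2.2 then st.1 ++ [st.2.1] else st.1) = crd ++ runsAux count col := by
  induction col generalizing crd count track with
  | nil =>
    cases track with
    | false => simp_all [runsAux]
    | true =>
      simp only [List.foldl_nil, runsAux]
      have : ¬ count = 0 := by simp at hinv; omega
      simp [this]
  | cons x xs ih =>
    rw [List.foldl_cons]
    cases track with
    | true =>
      rw [if_pos rfl] at hinv
      by_cases hx : x = 1
      · rw [show stepA (crd, count, true) x = (crd, count + 1, true) by
          simp [stepA, hx]]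
        rw [ih crd (count + 1) true (by rw [if_pos rfl]; omega)]
        rw [runsAux, if_pos hx]
      · rw [show stepA (crd, count, true) x = (crd ++ [count], 0, false) by
          simp [stepA, hx]]
        rw [ih (crd ++ [count]) 0 false (by simp)]
        rw [runsAux, if_neg hx, if_neg (by omega : ¬ count = 0)]
        rw [List.append_assoc]
        rfl
    | false =>
      rw [if_neg (by simp)] at hinv
      subst hinv
      by_cases hx : x = 1
      · rw [show stepA (crd, 0, false) x = (crd, 0 + 1, true) by
          simp [stepA, hx]]
        rw [ih crd (0 + 1) true (by simp)]
        rw [runsAux, if_pos hx]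
      · rw [show stepA (crd, 0, false) x = (crd, 0, false) by
          simp [stepA, hx]]
        rw [ih crd 0 false (by simp)]
        rw [runsAux, if_neg hx, if_pos rfl]

-- measure the groups of pySplitZero, with `count` ones pending into the first group
def gruns (count : Int) : List (List Char) → List Int
  | [] => []
  | h :: t => (if count + (h.length : Int) = 0 then [] else [count + (h.length : Int)]) ++
      (t.filter (fun g => g ≠ [])).map (fun g => ((g.length : Int)))

theorem gruns_zero (rest : List (List Char)) (hne : rest ≠ []) :
    gruns 0 rest = (rest.filter (fun g => g ≠ [])).map (fun g => ((g.length : Int))) := by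
  cases rest with
  | nil => exact absurd rfl hne
  | cons h t =>
    by_cases hh : h = []
    · subst hh; simp [gruns]
    · simp [gruns, hh]

theorem gruns_split_eq_runsAux (col : List Int) (count : Int) (hc : 0 ≤ count) :
    gruns count (pySplitZero (col.map (fun x => if x = 1 then '1' else '0'))) = runsAux count col := by
  induction col generalizing count with
  | nil => simp [pySplitZero, gruns, runsAux]
  | cons x xs ih =>
    by_cases hx : x = 1
    · simp only [List.map_cons, if_pos hx]
      rw [pySplitZero, if_neg (by decide)]
      rcases hsp : pySplitZero (xs.map (fun x => if x = 1 then '1' else '0')) with _ | ⟨h, t⟩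
      · exact absurd hsp (pySplitZero_ne_nil _)
      · have hrec := ih (count + 1) (by omega)
        rw [hsp] at hrec
        have hstep : gruns count (('1' :: h) :: t) = gruns (count + 1) (h :: t) := by
          simp only [gruns]
          have e : count + ((('1' :: h).length : Nat) : Int) = (count + 1) + ((h.length : Nat) : Int) := by
            rw [List.length_cons]
            push_cast
            ring
          rw [e]
        rw [hstep, hrec, runsAux, if_pos hx]
    · simp only [List.map_cons, if_neg hx]
      rw [pySplitZero, if_pos rfl]
      have hrec := ih 0 le_rfl
      simp only [gruns, List.length_nil]
      rw [← gruns_zero _ (pySplitZero_ne_nil _), hrec, runsAux, if_neg hx]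
      by_cases h0 : count = 0 <;> simp [h0]

-- under Pre_, A's curRow fold builds exactly B's column
theorem curRow_eq_col (cmap : List (List Int)) (j : Int) :
    (PySem.List.pyRange 0 (cmap.length : Int) 1).foldl
      (fun acc k => acc ++ [PySem.List.pyGetD (PySem.List.pyGetD cmap k []) j 0]) []
    = cmap.map (fun row => PySem.List.pyGetD row j 0) := by
  rw [PySem.List.foldl_pyRange_zero_pyGetD' cmap []
      (fun acc row => acc ++ [PySem.List.pyGetD row j 0]) []]
  simpa using PySem.List.foldl_append_singleton_eq_map (fun row => PySem.List.pyGetD row j 0) cmap []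

theorem acqRow_spec_aux (cmap : List (List Int)) (j : Int) :
    acqRow cmap j = acqRow_alt cmap j := by
  unfold acqRow acqRow_alt
  simp only [curRow_eq_col]
  set col := cmap.map (fun row => PySem.List.pyGetD row j 0) with hcol
  have hlen : (col.length : Int) = (cmap.length : Int) := by simp [hcol]
  have hfold :
      (PySem.List.pyRange 0 (col.length : Int) 1).foldl
        (fun (st : List Int × Int × Bool) k =>
          stepA st (PySem.List.pyGetD (PySem.List.pyGetD cmap k []) j 0)) ([], 0, false)
      = col.foldl stepA ([], 0, false) := by
    rw [hlen, PySem.List.foldl_pyRange_zero_pyGetD' cmap []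
        (fun (st : List Int × Int × Bool) row =>
          stepA st (PySem.List.pyGetD row j 0)) ([], 0, false)]
    rw [hcol, List.foldl_map]
  have hmach := machine_eq_runsAux col [] 0 false (by simp)
  have hruns := gruns_split_eq_runsAux col 0 le_rfl
  have hB : ((pySplitZero (col.map (fun x => if x = 1 then '1' else '0'))).filter
        (fun g => g ≠ [])).map (fun g => ((g.length : Int))) = runsAux 0 col := by
    rw [← gruns_zero _ (pySplitZero_ne_nil _)]
    exact hruns
  by_cases hmem : (1 : Int) ∈ col
  · rw [if_neg (by simpa using hmem)]
    have hne : runsAux 0 col ≠ [] := by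
      intro hEq
      exact ((runsAux_eq_nil_iff col 0 le_rfl).mp hEq).2 hmem
    simp only [hfold]
    rw [hmach]
    simp only [List.nil_append]
    rw [hB, if_neg hne]
  · rw [if_pos (by simpa using hmem)]
    have he : runsAux 0 col = [] := by
      rw [runsAux_eq_nil_iff col 0 le_rfl]; exact ⟨rfl, hmem⟩
    rw [hB, he, if_pos rfl]

-- ===== VERDICT (by name: the statement is the Claim_ definition above) =====
theorem acqRow_spec : Claim_equal_acqRow := by
  intro cmap j _ _
  exact acqRow_spec_aux cmap j
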